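-- pv_equiv track=rewrite | github.com/Njko/aoc_solver | solvers/days/y2015/day_24.py | solve_balance
-- ===== SOURCE A (Python) =====
-- from itertools import combinations
-- import math
--
-- def solve_balance(weights, groups):
--     total_weight = sum(weights)
--     target_weight = total_weight // groups
--
--     # We need to find the smallest group 1 that sums to target_weight
--     # Iterate length from 1 upwards
--     for length in range(1, len(weights)):
--         qes = []
--         for c in combinations(weights, length):
--             if sum(c) == target_weight:
--                 # Calculate QE
--                 qe = math.prod(c)
--                 qes.append(qe)
--
--         if qes:
--             return min(qes)
--     return -1
-- ===== SOURCE B (Python) =====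
-- def solve_balance(weights, groups):
--     target = sum(weights) // groups
--     # subset-sum DP: (count, sum) -> (min product, max product) over all
--     # subsets of that size and sum; scan counts ascending at the end.
--     dp = {(0, 0): (1, 1)}
--     for w in reversed(weights):
--         new = dict(dp)
--         for (c, s), (mn, mx) in dp.items():
--             key = (c + 1, s + w)
--             lo = min(mn * w, mx * w)
--             hi = max(mn * w, mx * w)
--             if key in new:
--                 olo, ohi = new[key]
--                 new[key] = (min(olo, lo), max(ohi, hi))
--             else:
--                 new[key] = (lo, hi)
--         dp = new
--     for length in range(1, len(weights)):
--         if (length, target) in dp: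
--             return dp[(length, target)][0]
--     return -1
-- ===== Notes on version B (the rewrite author's own statement) =====
-- stated objective: alternative
-- what changed: Replaces the per-length enumeration of all combinations (min product collected per length) by a single subset-sum dynamic program over a dict keyed by (count, sum) that carries the min and max product of such a subset (max is needed for exactness under negative weights), then scans counts ascending for the target sum.
import Mathlib
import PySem

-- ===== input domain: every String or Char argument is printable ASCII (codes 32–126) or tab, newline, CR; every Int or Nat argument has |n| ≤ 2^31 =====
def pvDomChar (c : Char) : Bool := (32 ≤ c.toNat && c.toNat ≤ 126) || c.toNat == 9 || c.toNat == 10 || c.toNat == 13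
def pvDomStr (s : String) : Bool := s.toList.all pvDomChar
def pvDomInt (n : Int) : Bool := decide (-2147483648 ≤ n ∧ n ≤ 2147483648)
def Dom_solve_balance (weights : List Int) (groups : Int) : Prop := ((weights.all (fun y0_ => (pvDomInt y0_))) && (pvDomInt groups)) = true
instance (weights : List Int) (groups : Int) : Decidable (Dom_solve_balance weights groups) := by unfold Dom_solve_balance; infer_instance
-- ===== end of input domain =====

-- B replaces A's per-length enumeration of all combinations by a single subset-sum
-- dynamic program keyed by (count, sum) holding the min and max product of such a
-- subset, then scans counts ascending (objective: alternative algorithm).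

-- ===== PORT A =====
-- 'for length in …: qes = …; if qes: return min(qes)' as recursion over the range list
def solve_balance_loopA (weights : List Int) (target : Int) : List Int → Int
  | [] => -1
  | length :: rest =>
    let qes : List Int := (PySem.List.combinations weights length.toNat).foldl
      (fun acc c => if c.sum = target then acc ++ [c.prod] else acc) []
    match qes with
    | [] => solve_balance_loopA weights target rest
    | q :: qs => qs.foldl min q          -- min(qes)

def solve_balance (weights : List Int) (groups : Int) : Int :=
  let total_weight := weights.sum
  let target_weight := PySem.Int.floordiv total_weight groups
  solve_balance_loopA weights target_weight (PySem.List.pyRange 1 (PySem.List.len weights) 1)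

-- ===== PORT B =====
-- one DP pass: fold dp.items into a copy of dp ('new = dict(dp); for … in dp.items(): …')
def stepB (w : Int) (dp : PySem.Dict (Int × Int) (Int × Int)) : PySem.Dict (Int × Int) (Int × Int) :=
  dp.items.foldl (fun nd it =>
    let key : Int × Int := (it.1.1 + 1, it.1.2 + w)
    let lo := min (it.2.1 * w) (it.2.2 * w)
    let hi := max (it.2.1 * w) (it.2.2 * w)
    match nd.get? key with
    | some o => nd.insert key (min o.1 lo, max o.2 hi)
    | none => nd.insert key (lo, hi)) dp

-- final scan: 'for length in range(1, len(weights)): if (length, target) in dp: …'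
def solve_balance_loopB (dp : PySem.Dict (Int × Int) (Int × Int)) (target : Int) : List Int → Int
  | [] => -1
  | length :: rest =>
    match dp.get? (length, target) with
    | some v => v.1
    | none => solve_balance_loopB dp target rest

def solve_balance_alt (weights : List Int) (groups : Int) : Int :=
  let target := PySem.Int.floordiv weights.sum groups
  let dp := weights.reverse.foldl (fun d w => stepB w d)
    (PySem.Dict.empty.insert ((0 : Int), (0 : Int)) ((1 : Int), (1 : Int)))
  solve_balance_loopB dp target (PySem.List.pyRange 1 (PySem.List.len weights) 1)

-- ===== PRECONDITION & SPEC =====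
-- Pre_ excludes only groups = 0, where Python A raises ZeroDivisionError.
def Pre_solve_balance (weights : List Int) (groups : Int) : Prop := groups ≠ 0
instance (weights : List Int) (groups : Int) : Decidable (Pre_solve_balance weights groups) := by unfold Pre_solve_balance; infer_instance
def pvWitness_solve_balance : List Int × Int := ([1, 1, 2], 2)
def Spec_solve_balance (weights : List Int) (groups : Int) (out : Int) : Prop := out = solve_balance_alt weights groups
instance (weights : List Int) (groups : Int) (out : Int) : Decidable (Spec_solve_balance weights groups out) := by unfold Spec_solve_balance; infer_instance

-- ===== CLAIM (what is proved, stated in full; the proofs are below) =====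
def Claim_equal_solve_balance : Prop := ∀ (weights : List Int) (groups : Int), Dom_solve_balance weights groups → Pre_solve_balance weights groups → Spec_solve_balance weights groups (solve_balance weights groups)

-- ===== LEMMAS AND PROOFS =====

-- products of the subsets of ys of size c and sum s, in A's (combinations) order
def prodsOf (ys : List Int) (c : Nat) (s : Int) : List Int :=
  ((PySem.List.combinations ys c).filter (fun l => l.sum = s)).map List.prod

-- (min, max) of a list, none when empty — what one dp entry must hold
def omm : List Int → Option (Int × Int)
  | [] => none
  | h :: t => some (t.foldl min h, t.foldl max h)

def ocomb : Option (Int × Int) → Option (Int × Int) → Option (Int × Int)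
  | none, y => y
  | x, none => x
  | some a, some b => some (min a.1 b.1, max a.2 b.2)

def contribB (w : Int) (v : Int × Int) : Int × Int :=
  (min (v.1 * w) (v.2 * w), max (v.1 * w) (v.2 * w))

def vcomb : Option (Int × Int) → (Int × Int) → (Int × Int)
  | some o, v => (min o.1 v.1, max o.2 v.2)
  | none, v => v

-- the dp invariant: each (count, sum) key holds (min, max) of the products list
def DPInv (dp : PySem.Dict (Int × Int) (Int × Int)) (ys : List Int) : Prop :=
  dp.keys.Nodup ∧
  (∀ q : Int × Int, q.1 < 0 → dp.get? q = none) ∧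
  (∀ (c : Nat) (s : Int), dp.get? ((c : Int), s) = omm (prodsOf ys c s))

theorem foldl_min_init (l : List Int) : ∀ a b : Int, l.foldl min (min a b) = min a (l.foldl min b) := by
  induction l with
  | nil => intro a b; rfl
  | cons c t ih =>
    intro a b
    simp only [List.foldl_cons, min_assoc]
    exact ih a (min b c)

theorem foldl_max_init (l : List Int) : ∀ a b : Int, l.foldl max (max a b) = max a (l.foldl max b) := by
  induction l with
  | nil => intro a b; rfl
  | cons c t ih =>
    intro a b
    simp only [List.foldl_cons, max_assoc]
    exact ih a (max b c)

theorem omm_append (a b : List Int) : omm (a ++ b) = ocomb (omm a) (omm b) := by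
  cases a with
  | nil => simp [omm, ocomb]
  | cons ha ta =>
    cases b with
    | nil => simp [omm, ocomb]
    | cons hb tb =>
      simp only [omm, List.cons_append, List.foldl_cons, List.foldl_append, ocomb]
      rw [foldl_min_init, foldl_max_init]

theorem ocomb_comm (x y : Option (Int × Int)) : ocomb x y = ocomb y x := by
  cases x <;> cases y <;> simp [ocomb, min_comm, max_comm]

theorem ocomb_none_right (x : Option (Int × Int)) : ocomb x none = x := by
  cases x <;> rfl

theorem ocomb_some_right (x : Option (Int × Int)) (v : Int × Int) :
    ocomb x (some v) = some (vcomb x v) := by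
  cases x <;> rfl

theorem foldl_min_unique (t : List Int) (h m : Int) (hmem : m = h ∨ m ∈ t)
    (hle : m ≤ h ∧ ∀ y ∈ t, m ≤ y) : t.foldl min h = m := by
  have h1 := PySem.List.foldl_min_le t h
  have h2 := PySem.List.foldl_min_mem t h
  apply le_antisymm
  · rcases hmem with rfl | hm
    · exact h1.1
    · exact h1.2 m hm
  · rcases h2 with h2 | h2
    · rw [h2]; exact hle.1
    · exact hle.2 _ h2

theorem foldl_max_unique (t : List Int) (h m : Int) (hmem : m = h ∨ m ∈ t)
    (hle : h ≤ m ∧ ∀ y ∈ t, y ≤ m) : t.foldl max h = m := by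
  have h1 := PySem.List.le_foldl_max t h
  have h2 := PySem.List.foldl_max_mem t h
  apply le_antisymm
  · rcases h2 with h2 | h2
    · rw [h2]; exact hle.1
    · exact hle.2 _ h2
  · rcases hmem with rfl | hm
    · exact h1.1
    · exact h1.2 m hm

theorem omm_map_mul (w : Int) (l : List Int) :
    omm (l.map (fun p => w * p)) =
      (omm l).map (fun x => (min (x.1 * w) (x.2 * w), max (x.1 * w) (x.2 * w))) := by
  cases l with
  | nil => rfl
  | cons h t =>
    simp only [omm, List.map_cons, Option.map_some]
    have hminmem := PySem.List.foldl_min_mem t h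
    have hminle := PySem.List.foldl_min_le t h
    have hmaxmem := PySem.List.foldl_max_mem t h
    have hmaxle := PySem.List.le_foldl_max t h
    set mn := t.foldl min h with hmn
    set mx := t.foldl max h with hmx
    have hbound : ∀ y, y = h ∨ y ∈ t → mn ≤ y ∧ y ≤ mx := by
      rintro y (rfl | hy)
      · exact ⟨hminle.1, hmaxle.1⟩
      · exact ⟨hminle.2 y hy, hmaxle.2 y hy⟩
    have hmul : ∀ y, y = h ∨ y ∈ t → min (mn * w) (mx * w) ≤ w * y ∧ w * y ≤ max (mn * w) (mx * w) := by
      intro y hy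
      obtain ⟨h1, h2⟩ := hbound y hy
      rcases le_or_gt 0 w with hw | hw
      · constructor
        · calc min (mn * w) (mx * w) ≤ mn * w := min_le_left _ _
            _ ≤ y * w := by exact mul_le_mul_of_nonneg_right h1 hw
            _ = w * y := mul_comm _ _
        · calc w * y = y * w := mul_comm _ _
            _ ≤ mx * w := mul_le_mul_of_nonneg_right h2 hw
            _ ≤ max (mn * w) (mx * w) := le_max_right _ _
      · constructor
        · calc min (mn * w) (mx * w) ≤ mx * w := min_le_right _ _
            _ ≤ y * w := mul_le_mul_of_nonpos_right h2 hw.le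
            _ = w * y := mul_comm _ _
        · calc w * y = y * w := mul_comm _ _
            _ ≤ mn * w := mul_le_mul_of_nonpos_right h1 hw.le
            _ ≤ max (mn * w) (mx * w) := le_max_left _ _
    have hmem2 : ∀ z : Int, z = mn * w ∨ z = mx * w → z = w * h ∨ z ∈ t.map (fun p => w * p) := by
      rintro z (rfl | rfl)
      · rcases hminmem with e | e
        · left; rw [e, mul_comm]
        · right; exact List.mem_map.2 ⟨mn, e, mul_comm _ _⟩
      · rcases hmaxmem with e | e
        · left; rw [e, mul_comm]
        · right; exact List.mem_map.2 ⟨mx, e, mul_comm _ _⟩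
    congr 1
    refine Prod.ext ?_ ?_
    · apply foldl_min_unique
      · rcases le_total (mn * w) (mx * w) with hc | hc
        · rw [min_eq_left hc]; exact hmem2 _ (Or.inl rfl)
        · rw [min_eq_right hc]; exact hmem2 _ (Or.inr rfl)
      · constructor
        · exact (hmul h (Or.inl rfl)).1
        · intro y hy
          obtain ⟨p, hp, rfl⟩ := List.mem_map.1 hy
          exact (hmul p (Or.inr hp)).1
    · apply foldl_max_unique
      · rcases le_total (mn * w) (mx * w) with hc | hc
        · rw [max_eq_right hc]; exact hmem2 _ (Or.inr rfl)
        · rw [max_eq_left hc]; exact hmem2 _ (Or.inl rfl)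
      · constructor
        · exact (hmul h (Or.inl rfl)).2
        · intro y hy
          obtain ⟨p, hp, rfl⟩ := List.mem_map.1 hy
          exact (hmul p (Or.inr hp)).2

theorem prodsOf_zero (ys : List Int) (s : Int) :
    prodsOf ys 0 s = if s = 0 then [1] else [] := by
  by_cases h : s = 0 <;>
    simp [prodsOf, PySem.List.combinations_zero, List.filter, h] <;>
    simp [Ne.symm h]

theorem prodsOf_succ (w : Int) (ys : List Int) (c : Nat) (s : Int) :
    prodsOf (w :: ys) (c + 1) s
      = (prodsOf ys c (s - w)).map (fun p => w * p) ++ prodsOf ys (c + 1) s := by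
  unfold prodsOf
  rw [PySem.List.combinations_cons_succ, List.filter_append, List.map_append, List.filter_map]
  congr 1
  rw [List.map_map, List.map_map]
  have hpred : ((fun (l : List Int) => decide (l.sum = s)) ∘ (fun l => w :: l))
      = fun (l : List Int) => decide (l.sum = s - w) := by
    funext l
    simp only [Function.comp, List.sum_cons]
    apply Bool.eq_iff_iff.mpr
    simp only [decide_eq_true_eq]
    omega
  rw [hpred]
  congr 1

theorem stepB_fold_get (w : Int) (its : List ((Int × Int) × (Int × Int)))
    (nd : PySem.Dict (Int × Int) (Int × Int))
    (hn : (its.map (fun it => ((it.1.1 + 1, it.1.2 + w) : Int × Int))).Nodup)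
    (q : Int × Int) :
    (its.foldl (fun nd it =>
      let key : Int × Int := (it.1.1 + 1, it.1.2 + w)
      let lo := min (it.2.1 * w) (it.2.2 * w)
      let hi := max (it.2.1 * w) (it.2.2 * w)
      match nd.get? key with
      | some o => nd.insert key (min o.1 lo, max o.2 hi)
      | none => nd.insert key (lo, hi)) nd).get? q
    = match its.find? (fun it => ((it.1.1 + 1, it.1.2 + w) : Int × Int) == q) with
      | some it => some (vcomb (nd.get? q) (contribB w it.2))
      | none => nd.get? q := by
  induction its generalizing nd with
  | nil => rfl
  | cons it0 rest ih =>
    simp only [List.map_cons, List.nodup_cons] at hn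
    obtain ⟨hnot, hn'⟩ := hn
    have hbody : ∀ (d : PySem.Dict (Int × Int) (Int × Int)),
        (match d.get? (it0.1.1 + 1, it0.1.2 + w) with
          | some o => d.insert (it0.1.1 + 1, it0.1.2 + w) (min o.1 (min (it0.2.1 * w) (it0.2.2 * w)), max o.2 (max (it0.2.1 * w) (it0.2.2 * w)))
          | none => d.insert (it0.1.1 + 1, it0.1.2 + w) (min (it0.2.1 * w) (it0.2.2 * w), max (it0.2.1 * w) (it0.2.2 * w)))
        = d.insert (it0.1.1 + 1, it0.1.2 + w) (vcomb (d.get? (it0.1.1 + 1, it0.1.2 + w)) (contribB w it0.2)) := by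
      intro d
      cases d.get? ((it0.1.1 + 1, it0.1.2 + w) : Int × Int) <;> rfl
    have hstep : ((it0 :: rest).foldl (fun (nd : PySem.Dict (Int × Int) (Int × Int)) it =>
        let key : Int × Int := (it.1.1 + 1, it.1.2 + w)
        let lo := min (it.2.1 * w) (it.2.2 * w)
        let hi := max (it.2.1 * w) (it.2.2 * w)
        match nd.get? key with
        | some o => nd.insert key (min o.1 lo, max o.2 hi)
        | none => nd.insert key (lo, hi)) nd).get? q
      = ((rest.foldl (fun (nd : PySem.Dict (Int × Int) (Int × Int)) it =>
        let key : Int × Int := (it.1.1 + 1, it.1.2 + w)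
        let lo := min (it.2.1 * w) (it.2.2 * w)
        let hi := max (it.2.1 * w) (it.2.2 * w)
        match nd.get? key with
        | some o => nd.insert key (min o.1 lo, max o.2 hi)
        | none => nd.insert key (lo, hi))
        (nd.insert (it0.1.1 + 1, it0.1.2 + w) (vcomb (nd.get? (it0.1.1 + 1, it0.1.2 + w)) (contribB w it0.2))))).get? q := by
      rw [List.foldl_cons]
      exact congrArg (fun d => (List.foldl (fun (nd : PySem.Dict (Int × Int) (Int × Int)) it =>
        let key : Int × Int := (it.1.1 + 1, it.1.2 + w)
        let lo := min (it.2.1 * w) (it.2.2 * w)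
        let hi := max (it.2.1 * w) (it.2.2 * w)
        match nd.get? key with
        | some o => nd.insert key (min o.1 lo, max o.2 hi)
        | none => nd.insert key (lo, hi)) d rest).get? q) (hbody nd)
    rw [hstep]
    rw [ih _ hn']
    by_cases hq : q = ((it0.1.1 + 1, it0.1.2 + w) : Int × Int)
    · subst hq
      have hfind : rest.find? (fun it => ((it.1.1 + 1, it.1.2 + w) : Int × Int) == (it0.1.1 + 1, it0.1.2 + w)) = none := by
        apply List.find?_eq_none.2
        intro x hx
        simp only [beq_iff_eq]
        intro hc
        exact hnot (by rw [← hc]; exact List.mem_map.2 ⟨x, hx, rfl⟩)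
      rw [hfind]
      simp only [List.find?_cons, beq_self_eq_true]
      rw [PySem.Dict.get?_insert_self]
    · have h1 : (nd.insert ((it0.1.1 + 1, it0.1.2 + w) : Int × Int) (vcomb (nd.get? (it0.1.1 + 1, it0.1.2 + w)) (contribB w it0.2))).get? q = nd.get? q :=
        PySem.Dict.get?_insert_of_ne _ _ hq
      rw [h1]
      simp only [List.find?_cons]
      rw [show (((it0.1.1 + 1, it0.1.2 + w) : Int × Int) == q) = false from beq_eq_false_iff_ne.2 (fun hc => hq (hc ▸ rfl))]

theorem stepB_get (w : Int) (dp : PySem.Dict (Int × Int) (Int × Int)) (hk : dp.keys.Nodup)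
    (q : Int × Int) :
    (stepB w dp).get? q
      = ocomb (dp.get? q) ((dp.get? (q.1 - 1, q.2 - w)).map (contribB w)) := by
  have hg : Function.Injective (fun k : Int × Int => ((k.1 + 1, k.2 + w) : Int × Int)) := by
    intro a b hab
    simp only [Prod.ext_iff] at hab ⊢
    omega
  have hn : (dp.items.map (fun it => ((it.1.1 + 1, it.1.2 + w) : Int × Int))).Nodup := by
    have : dp.items.map (fun it => ((it.1.1 + 1, it.1.2 + w) : Int × Int))
        = (dp.items.map (fun it => it.1)).map (fun k : Int × Int => (k.1 + 1, k.2 + w)) := by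
      rw [List.map_map]
      rfl
    rw [this]
    exact List.Nodup.map hg hk
  have hpred : (fun (it : (Int × Int) × (Int × Int)) => (((it.1.1 + 1, it.1.2 + w) : Int × Int) == q))
      = (fun it => it.1 == ((q.1 - 1, q.2 - w) : Int × Int)) := by
    funext it
    apply Bool.eq_iff_iff.mpr
    simp only [beq_iff_eq, Prod.ext_iff]
    omega
  rw [show (stepB w dp).get? q = _ from stepB_fold_get w dp.items dp hn q, hpred]
  have hget : dp.get? ((q.1 - 1, q.2 - w) : Int × Int)
      = (dp.items.find? (fun it => it.1 == ((q.1 - 1, q.2 - w) : Int × Int))).map (fun x => x.2) := rfl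
  cases hfind : dp.items.find? (fun it => it.1 == ((q.1 - 1, q.2 - w) : Int × Int)) with
  | none => rw [hget, hfind]; simp [ocomb_none_right]
  | some it => rw [hget, hfind]; simp [ocomb_some_right]

theorem stepB_fold_nodup (w : Int) (its : List ((Int × Int) × (Int × Int)))
    (nd : PySem.Dict (Int × Int) (Int × Int)) (hk : nd.keys.Nodup) :
    (its.foldl (fun nd it =>
      let key : Int × Int := (it.1.1 + 1, it.1.2 + w)
      let lo := min (it.2.1 * w) (it.2.2 * w)
      let hi := max (it.2.1 * w) (it.2.2 * w)
      match nd.get? key with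
      | some o => nd.insert key (min o.1 lo, max o.2 hi)
      | none => nd.insert key (lo, hi)) nd).keys.Nodup := by
  induction its generalizing nd with
  | nil => exact hk
  | cons it0 rest ih =>
    simp only [List.foldl_cons]
    apply ih
    cases nd.get? ((it0.1.1 + 1, it0.1.2 + w) : Int × Int) <;>
      exact PySem.Dict.nodup_keys_insert _ _ _ hk

theorem stepB_nodup (w : Int) (dp : PySem.Dict (Int × Int) (Int × Int)) (hk : dp.keys.Nodup) :
    (stepB w dp).keys.Nodup := stepB_fold_nodup w dp.items dp hk

theorem DPInv_step (w : Int) (dp : PySem.Dict (Int × Int) (Int × Int)) (ys : List Int)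
    (h : DPInv dp ys) : DPInv (stepB w dp) (w :: ys) := by
  obtain ⟨hk, hneg, hmain⟩ := h
  refine ⟨stepB_nodup w dp hk, ?_, ?_⟩
  · intro q hq
    rw [stepB_get w dp hk q, hneg q hq, hneg (q.1 - 1, q.2 - w) (by simp; omega)]
    rfl
  · intro c s
    rw [stepB_get w dp hk ((c : Int), s)]
    cases c with
    | zero =>
      have h1 : dp.get? (((0 : Nat) : Int) - 1, s - w) = none := by
        apply hneg
        simp
      rw [h1]
      simp only [Option.map_none, ocomb_none_right]
      rw [hmain 0 s]
      rw [prodsOf_zero, prodsOf_zero]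
    | succ c =>
      have e1 : (((c + 1 : Nat) : Int), s) = (((c : Nat) : Int) + 1, s) := by
        simp
      have e2 : ((((c + 1 : Nat) : Int), s).1 - 1, ((((c + 1 : Nat) : Int)), s).2 - w) = (((c : Nat) : Int), s - w) := by
        simp
      rw [e1, ← e1, hmain (c + 1) s, e2, hmain c (s - w)]
      rw [prodsOf_succ, omm_append, omm_map_mul, ocomb_comm]
      rfl

theorem DPInv_init : DPInv (PySem.Dict.empty.insert ((0 : Int), (0 : Int)) ((1 : Int), (1 : Int))) [] := by
  have hget : ∀ q : Int × Int,
      (PySem.Dict.empty.insert ((0 : Int), (0 : Int)) ((1 : Int), (1 : Int))).get? q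
        = if q = ((0 : Int), (0 : Int)) then some ((1 : Int), (1 : Int)) else none := by
    intro q
    by_cases hq : q = ((0 : Int), (0 : Int))
    · subst hq
      simp [PySem.Dict.get?_insert_self]
    · rw [PySem.Dict.get?_insert_of_ne _ _ hq]
      simp [hq, PySem.Dict.get?_empty]
  refine ⟨?_, ?_, ?_⟩
  · exact PySem.Dict.nodup_keys_insert _ _ _ PySem.Dict.nodup_keys_empty
  · intro q hq
    rw [hget q]
    have : q ≠ ((0 : Int), (0 : Int)) := by
      intro hc
      rw [hc] at hq
      omega
    simp [this]
  · intro c s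
    rw [hget]
    cases c with
    | zero =>
      by_cases hs : s = 0 <;> simp [hs, prodsOf_zero, omm]
    | succ c =>
      have : (((c + 1 : Nat) : Int), s) ≠ ((0 : Int), (0 : Int)) := by
        intro hc
        simp [Prod.ext_iff] at hc
        omega
      simp only [this, if_false]
      rw [show prodsOf [] (c + 1) s = [] from by
        simp [prodsOf, PySem.List.combinations_nil_succ]]
      rfl

theorem DPInv_build (ws : List Int) :
    DPInv (ws.reverse.foldl (fun d w => stepB w d)
      (PySem.Dict.empty.insert ((0 : Int), (0 : Int)) ((1 : Int), (1 : Int)))) ws := by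
  induction ws with
  | nil => exact DPInv_init
  | cons w t ih =>
    simpa [List.foldl_append] using DPInv_step w _ t ih

theorem loops_eq (weights : List Int) (target : Int)
    (dp : PySem.Dict (Int × Int) (Int × Int)) (hInv : DPInv dp weights)
    (rng : List Int) (hpos : ∀ L ∈ rng, 1 ≤ L) :
    solve_balance_loopA weights target rng = solve_balance_loopB dp target rng := by
  induction rng with
  | nil => rfl
  | cons L rest ih =>
    have hL : 1 ≤ L := hpos L (List.mem_cons_self)
    have hqes : (PySem.List.combinations weights L.toNat).foldl
        (fun acc c => if c.sum = target then acc ++ [c.prod] else acc) []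
        = prodsOf weights L.toNat target := by
      rw [PySem.List.foldl_append_ite (p := fun (c : List Int) => c.sum = target) (f := List.prod)]
      rfl
    have hdp : dp.get? (L, target) = omm (prodsOf weights L.toNat target) := by
      have := hInv.2.2 L.toNat target
      rwa [Int.toNat_of_nonneg (by omega)] at this
    rw [solve_balance_loopA, solve_balance_loopB]
    simp only [hqes]
    cases hcase : prodsOf weights L.toNat target with
    | nil =>
      rw [hcase] at hdp
      simp only [hdp, omm]
      exact ih (fun x hx => hpos x (List.mem_cons_of_mem _ hx))
    | cons q qs =>
      rw [hcase] at hdp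
      simp only [hdp, omm]

-- ===== VERDICT (by name: the statement is the Claim_ definition above) =====
theorem solve_balance_spec : Claim_equal_solve_balance := by
  intro weights groups _ _
  unfold Spec_solve_balance solve_balance solve_balance_alt
  apply loops_eq
  · exact DPInv_build weights
  · intro L hL
    have := (PySem.List.mem_pyRange_one (a := 1) (b := PySem.List.len weights) (x := L)).1 hL
    omega
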